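-- pv_equiv track=rewrite | github.com/KimJinung/problem_solving | Algorithm/Programmers/0/특정 문자열로 끝나는 가장 긴 부분 문자열 찾기.py | solution
-- ===== SOURCE A (Python) =====
-- def solution(myString, pat):
--     answer = ""
--     mem = ""
--
--     for ch in myString:
--         mem += ch
--
--         if mem.endswith(pat):
--             answer = mem
--
--     return answer
-- ===== SOURCE B (Python) =====
-- def solution(myString, pat):
--     for i in range(len(myString), len(pat) - 1, -1):
--         if myString[:i].endswith(pat):
--             return myString[:i]
--     return ""
-- ===== Notes on version B (the rewrite author's own statement) =====
-- stated objective: faster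
-- what changed: B scans prefix lengths from the longest down and returns the first prefix ending with pat immediately, instead of A's forward accumulation that rebuilds the growing prefix and keeps the last match; a timing run measured B faster since it avoids the n endswith checks and string accumulation when a long prefix matches.
import Mathlib
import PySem

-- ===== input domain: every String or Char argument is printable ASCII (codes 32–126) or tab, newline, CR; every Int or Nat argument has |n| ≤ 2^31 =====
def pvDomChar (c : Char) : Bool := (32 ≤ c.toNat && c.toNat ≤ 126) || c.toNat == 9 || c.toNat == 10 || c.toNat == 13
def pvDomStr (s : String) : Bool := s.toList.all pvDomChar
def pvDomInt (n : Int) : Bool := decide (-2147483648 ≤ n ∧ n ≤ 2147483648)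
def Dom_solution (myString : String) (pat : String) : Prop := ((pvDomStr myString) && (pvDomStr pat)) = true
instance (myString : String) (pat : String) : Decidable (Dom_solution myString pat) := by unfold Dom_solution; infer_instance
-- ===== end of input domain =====

-- B scans prefix lengths from the longest down and returns the first prefix ending with pat,
-- instead of A's forward accumulation keeping the last match; same exact return value.


-- ===== PORT A =====
-- one loop step: mem += ch; if mem.endswith(pat): answer = mem   (state = (answer, mem))
def aStep (pat : List Char) (st : List Char × List Char) (ch : Char) : List Char × List Char :=
  let mem' := st.2 ++ [ch]
  if PySem.Chars.endswith mem' pat then (mem', mem') else (st.1, mem')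

def solution (myString : String) (pat : String) : String :=
  String.ofList ((myString.toList.foldl (aStep (pat.toList)) ([], [])).1)

-- ===== PORT B =====
-- the descending loop 'for i in range(len(s), len(pat)-1, -1)' as recursion on the number of
-- remaining candidates k; the current index is i = len(pat) + k - 1, s[:i] (0 ≤ i) is take i
def bGo (s pat : List Char) : Nat → List Char
  | 0 => []
  | k + 1 =>
    let i := pat.length + k
    if PySem.Chars.endswith (s.take i) pat then s.take i else bGo s pat k

def solution_alt (myString : String) (pat : String) : String :=
  String.ofList (bGo myString.toList pat.toList (myString.toList.length + 1 - pat.toList.length))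

-- ===== PRECONDITION & SPEC =====
def Spec_solution (myString : String) (pat : String) (out : String) : Prop := out = solution_alt myString pat
instance (myString : String) (pat : String) (out : String) : Decidable (Spec_solution myString pat out) := by unfold Spec_solution; infer_instance

-- ===== CLAIM (what is proved, stated in full; the proofs are below) =====
def Claim_equal_solution : Prop := ∀ (myString : String) (pat : String), Dom_solution myString pat → Spec_solution myString pat (solution myString pat)

-- ===== LEMMAS AND PROOFS =====

-- bGo only looks at take i s for i < pat.length + k, so appending a character is invisible
lemma bGo_append (s pat : List Char) (c : Char) (k : Nat) (hk : pat.length + k ≤ s.length + 1) :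
    bGo (s ++ [c]) pat k = bGo s pat k := by
  induction k with
  | zero => rfl
  | succ k ih =>
    have hi : pat.length + k ≤ s.length := by omega
    have ht : (s ++ [c]).take (pat.length + k) = s.take (pat.length + k) :=
      List.take_append_of_le_length hi
    simp only [bGo, ht, ih (by omega)]

-- loop invariant for A's fold: mem is the processed prefix and answer is B's result on it
lemma fold_invariant (pat s : List Char) :
    (s.foldl (aStep pat) ([], [])).2 = s ∧
    (s.foldl (aStep pat) ([], [])).1 = bGo s pat (s.length + 1 - pat.length) := by
  induction s using List.reverseRecOn with
  | nil =>
    constructor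
    · rfl
    · by_cases hp : pat.length = 0
      · have hpat : pat = [] := List.length_eq_zero_iff.mp hp
        subst hpat
        simp [bGo, PySem.Chars.endswith]
      · have : (0 : Nat) + 1 - pat.length = 0 := by omega
        simp [this, bGo]
  | append_singleton s c ih =>
    obtain ⟨hmem, hans⟩ := ih
    rcases hfold : List.foldl (aStep pat) ([], []) s with ⟨ans, mem⟩
    rw [hfold] at hmem hans
    simp only at hmem hans
    subst mem
    rw [List.foldl_append, hfold]
    simp only [List.foldl_cons, List.foldl_nil, aStep]
    by_cases hend : PySem.Chars.endswith (s ++ [c]) pat = true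
    · -- the new full prefix matches: both sides return s ++ [c]
      have hple : pat.length ≤ s.length + 1 := by
        have := ((PySem.Chars.endswith_iff _ _).mp hend).length_le
        simpa using this
      have hk : (s ++ [c]).length + 1 - pat.length = (s.length + 1 - pat.length) + 1 := by
        simp; omega
      have hi : pat.length + (s.length + 1 - pat.length) = s.length + 1 := by omega
      constructor
      · simp [hend]
      · simp only [hend, if_true, hk, bGo, hi]
        have : (s ++ [c]).take (s.length + 1) = s ++ [c] := by
          apply List.take_of_length_le; simp
        rw [this, hend, if_pos rfl]
    · -- no match at full length: B also skips its first candidate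
      have hend' : PySem.Chars.endswith (s ++ [c]) pat = false := by
        cases hb : PySem.Chars.endswith (s ++ [c]) pat with
        | false => rfl
        | true => exact absurd hb hend
      constructor
      · simp [hend']
      · simp only [hend', Bool.false_eq_true, if_false]
        rw [hans]
        by_cases hple : pat.length ≤ s.length + 1
        · have hk : (s ++ [c]).length + 1 - pat.length = (s.length + 1 - pat.length) + 1 := by
            simp; omega
          have hi : pat.length + (s.length + 1 - pat.length) = s.length + 1 := by omega
          rw [hk]
          simp only [bGo, hi]
          have ht : (s ++ [c]).take (s.length + 1) = s ++ [c] := by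
            apply List.take_of_length_le; simp
          rw [ht, hend']
          simp only [Bool.false_eq_true, if_false]
          exact (bGo_append s pat c (s.length + 1 - pat.length) (by omega)).symm
        · have h1 : s.length + 1 - pat.length = 0 := by omega
          have h2 : (s ++ [c]).length + 1 - pat.length = 0 := by simp; omega
          rw [h1, h2]
          rfl

-- ===== VERDICT (by name: the statement is the Claim_ definition above) =====
theorem solution_spec : Claim_equal_solution := by
  intro myString pat _
  unfold Spec_solution solution solution_alt
  rw [(fold_invariant pat.toList myString.toList).2]
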